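-- pv_equiv track=rewrite | github.com/bluekeyes/sphinx-javalink | javalink/model.py | _next_arg_class
-- ===== SOURCE A (Python) =====
-- def _next_arg_class(s):
--     end = name_end = len(s)
--
--     type_arg_count = 0
--     for i in range(0, len(s)):
--         c = s[i]
--         if c == ';':
--             name_end = min(i, name_end)
--             if type_arg_count == 0:
--                 end = i + 1
--                 break
--         elif c == '<':
--             name_end = min(i, name_end)
--             type_arg_count += 1
--         elif c == '>':
--             type_arg_count -= 1
--
--     return (s[:name_end], s[end:])
-- ===== SOURCE B (Python) =====
-- def _next_arg_class(s):
--     n = len(s)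
--     lt = s.find('<')
--     sc = s.find(';')
--     name_end = min(lt if lt != -1 else n, sc if sc != -1 else n)
--
--     # first ';' whose prefix is '<'/'>'-balanced is the first top-level ';'
--     end = next((i + 1 for i, c in enumerate(s)
--                 if c == ';' and s.count('<', 0, i) == s.count('>', 0, i)), n)
--
--     return (s[:name_end], s[end:])
-- ===== Notes on version B (the rewrite author's own statement) =====
-- stated objective: alternative
-- what changed: A's single stateful scan (running depth counter with break and min-accumulated name_end) is replaced by stateless computations: name_end from two str.find calls, and end as the first ';' whose prefix has equally many '<' and '>' (a per-position count-balance test via next()/enumerate, no running accumulator).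
import Mathlib
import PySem

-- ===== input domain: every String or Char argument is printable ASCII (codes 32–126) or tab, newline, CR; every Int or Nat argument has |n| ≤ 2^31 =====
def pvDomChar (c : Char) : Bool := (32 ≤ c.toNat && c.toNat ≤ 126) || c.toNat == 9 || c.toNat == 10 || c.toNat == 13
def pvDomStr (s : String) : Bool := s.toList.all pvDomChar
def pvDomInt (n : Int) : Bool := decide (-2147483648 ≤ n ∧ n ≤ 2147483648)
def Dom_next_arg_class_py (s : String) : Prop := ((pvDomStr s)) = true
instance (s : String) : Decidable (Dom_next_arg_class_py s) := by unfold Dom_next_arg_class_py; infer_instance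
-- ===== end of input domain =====

-- B replaces A's single stateful scan (running depth counter, break, min-accumulated
-- name_end) by stateless computations: name_end from two str.find calls and end as the
-- first ';' whose prefix holds equally many '<' and '>' (objective: alternative algorithm).
-- Both programs return on every string (no Pre_ needed).

-- ===== PORT A =====
-- A's single loop over range(len(s)); state (end, name_end, type_arg_count); returns (name_end, end).
def nextArgClassGo : List Char → Nat → Nat → Nat → Int → Nat × Nat
  | [], _, e, ne, _ => (ne, e)
  | c :: rest, i, e, ne, t =>
    if c = ';' then
      let ne' := min i ne
      if t = 0 then (ne', i + 1) else nextArgClassGo rest (i + 1) e ne' t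
    else if c = '<' then nextArgClassGo rest (i + 1) e (min i ne) (t + 1)
    else if c = '>' then nextArgClassGo rest (i + 1) e ne (t - 1)
    else nextArgClassGo rest (i + 1) e ne t

def next_arg_class_py (s : String) : String × String :=
  let l := s.toList
  let r := nextArgClassGo l 0 l.length l.length 0
  -- s[:name_end] / s[end:] with 0 ≤ index ≤ len(s) are exactly take / drop
  (String.ofList (l.take r.1), String.ofList (l.drop r.2))

-- ===== PORT B =====
-- B's generator: first index i with s[i] = ';' and s.count('<',0,i) = s.count('>',0,i);
-- next(..., n) is the getD below. s.count(c,0,i) is (l.take i).count c.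
def bEnd (l : List Char) : List Char → Nat → Option Nat
  | [], _ => none
  | c :: rest, i =>
    if c = ';' ∧ (l.take i).count '<' = (l.take i).count '>' then some (i + 1)
    else bEnd l rest (i + 1)

def next_arg_class_py_alt (s : String) : String × String :=
  let l := s.toList
  let lt := PySem.Chars.find l ['<']
  let sc := PySem.Chars.find l [';']
  let ne := min (if lt = -1 then l.length else lt.toNat)
                (if sc = -1 then l.length else sc.toNat)
  let e := (bEnd l l 0).getD l.length
  (String.ofList (l.take ne), String.ofList (l.drop e))

-- ===== PRECONDITION & SPEC =====
def Spec_next_arg_class_py (s : String) (out : String × String) : Prop := out = next_arg_class_py_alt s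
instance (s : String) (out : String × String) : Decidable (Spec_next_arg_class_py s out) := by unfold Spec_next_arg_class_py; infer_instance

-- ===== CLAIM (what is proved, stated in full; the proofs are below) =====
def Claim_equal_next_arg_class_py : Prop := ∀ (s : String), Dom_next_arg_class_py s → Spec_next_arg_class_py s (next_arg_class_py s)

-- ===== LEMMAS AND PROOFS =====

-- proof-side 'end' characterisation of A's loop: first ';' at depth 0
def nextArgClassDepth : List Char → Nat → Int → Option Nat
  | [], _, _ => none
  | c :: rest, i, d =>
    if c = ';' ∧ d = 0 then some (i + 1)
    else if c = '<' then nextArgClassDepth rest (i + 1) (d + 1)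
    else if c = '>' then nextArgClassDepth rest (i + 1) (d - 1)
    else nextArgClassDepth rest (i + 1) d

-- A's loop, characterised (under the invariant ne ≤ i + remaining length): name_end is the
-- accumulator min'd with the index of the first '<' or ';'; end is the depth pass with default e.
theorem nextArgClassGo_eq (l : List Char) : ∀ (i e ne : Nat) (t : Int), ne ≤ i + l.length →
    nextArgClassGo l i e ne t =
      (min ne (i + l.findIdx (fun c => c = ';' || c = '<')),
       (nextArgClassDepth l i t).getD e) := by
  induction l with
  | nil =>
    intro i e ne t h
    simp only [List.length_nil, Nat.add_zero] at h
    simp only [nextArgClassGo, nextArgClassDepth, List.findIdx_nil, Nat.add_zero,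
      Option.getD_none, Prod.mk.injEq]
    exact ⟨by omega, by trivial⟩
  | cons c rest ih =>
    intro i e ne t h
    simp only [List.length_cons] at h
    by_cases hsemi : c = ';'
    · subst hsemi
      by_cases ht : t = 0
      · subst ht
        have hF : List.findIdx (fun c => decide (c = ';') || decide (c = '<')) (';' :: rest) = 0 := by
          simp [List.findIdx_cons]
        simp only [nextArgClassGo, nextArgClassDepth, and_self, if_true, hF,
          Nat.add_zero, Option.getD_some, Prod.mk.injEq]
        exact ⟨by omega, by trivial⟩
      · have hA : nextArgClassGo (';' :: rest) i e ne t
            = nextArgClassGo rest (i + 1) e (min i ne) t := by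
          simp [nextArgClassGo, ht]
        have hB : nextArgClassDepth (';' :: rest) i t
            = nextArgClassDepth rest (i + 1) t := by
          simp [nextArgClassDepth, ht]
        rw [hA, hB, ih (i + 1) e (min i ne) t (by omega)]
        have hF : List.findIdx (fun c => decide (c = ';') || decide (c = '<')) (';' :: rest) = 0 := by
          simp [List.findIdx_cons]
        rw [hF]
        simp only [Nat.add_zero, Prod.mk.injEq]
        exact ⟨by omega, by trivial⟩
    · by_cases hlt : c = '<'
      · subst hlt
        have hA : nextArgClassGo ('<' :: rest) i e ne t
            = nextArgClassGo rest (i + 1) e (min i ne) (t + 1) := by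
          simp [nextArgClassGo]
        have hB : nextArgClassDepth ('<' :: rest) i t
            = nextArgClassDepth rest (i + 1) (t + 1) := by
          simp [nextArgClassDepth]
        rw [hA, hB, ih (i + 1) e (min i ne) (t + 1) (by omega)]
        have hF : List.findIdx (fun c => decide (c = ';') || decide (c = '<')) ('<' :: rest) = 0 := by
          simp [List.findIdx_cons]
        rw [hF]
        simp only [Nat.add_zero, Prod.mk.injEq]
        exact ⟨by omega, by trivial⟩
      · by_cases hgt : c = '>'
        · subst hgt
          have hA : nextArgClassGo ('>' :: rest) i e ne t
              = nextArgClassGo rest (i + 1) e ne (t - 1) := by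
            simp [nextArgClassGo]
          have hB : nextArgClassDepth ('>' :: rest) i t
              = nextArgClassDepth rest (i + 1) (t - 1) := by
            simp [nextArgClassDepth]
          rw [hA, hB, ih (i + 1) e ne (t - 1) (by omega)]
          have hF : List.findIdx (fun c => decide (c = ';') || decide (c = '<')) ('>' :: rest)
              = List.findIdx (fun c => decide (c = ';') || decide (c = '<')) rest + 1 := by
            simp [List.findIdx_cons]
          rw [hF]
          simp only [Prod.mk.injEq]
          exact ⟨by omega, by trivial⟩
        · have hA : nextArgClassGo (c :: rest) i e ne t
              = nextArgClassGo rest (i + 1) e ne t := by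
            simp [nextArgClassGo, hsemi, hlt, hgt]
          have hB : nextArgClassDepth (c :: rest) i t
              = nextArgClassDepth rest (i + 1) t := by
            simp [nextArgClassDepth, hsemi, hlt, hgt]
          rw [hA, hB, ih (i + 1) e ne t (by omega)]
          have hF : List.findIdx (fun c => decide (c = ';') || decide (c = '<')) (c :: rest)
              = List.findIdx (fun c => decide (c = ';') || decide (c = '<')) rest + 1 := by
            simp [List.findIdx_cons, hsemi, hlt]
          rw [hF]
          simp only [Prod.mk.injEq]
          exact ⟨by omega, by trivial⟩

-- B's count-balance test agrees with the depth pass: the running depth at position |pre|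
-- equals count '<' pre - count '>' pre.
theorem bEnd_eq_depth : ∀ (suf pre : List Char) (t : Int),
    t = (pre.count '<' : Int) - (pre.count '>' : Int) →
    bEnd (pre ++ suf) suf pre.length = nextArgClassDepth suf pre.length t := by
  intro suf
  induction suf with
  | nil => intro pre t _; simp [bEnd, nextArgClassDepth]
  | cons c rest ih =>
    intro pre t ht
    have htake : (pre ++ c :: rest).take pre.length = pre := List.take_left ..
    have hcnt : ∀ x : Char, (pre ++ [c]).count x = pre.count x + (if c = x then 1 else 0) := by
      intro x; simp [List.count_append, List.count_singleton]
    by_cases hsemi : c = ';'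
    · subst hsemi
      by_cases hbal : pre.count '<' = pre.count '>'
      · have ht0 : t = 0 := by omega
        simp [bEnd, nextArgClassDepth, htake, hbal, ht0]
      · have ht0 : ¬ t = 0 := by omega
        have hrec : bEnd (pre ++ ';' :: rest) (';' :: rest) pre.length
            = bEnd (pre ++ ';' :: rest) rest (pre.length + 1) := by
          simp [bEnd, htake, hbal]
        have hrw : pre ++ ';' :: rest = (pre ++ [';']) ++ rest := by simp
        rw [hrec, hrw]
        have := ih (pre ++ [';']) t (by
          rw [hcnt, hcnt]; simp; omega)
        simp only [List.length_append, List.length_singleton] at this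
        rw [this]
        simp [nextArgClassDepth, ht0]
    · by_cases hlt : c = '<'
      · subst hlt
        have hrec : bEnd (pre ++ '<' :: rest) ('<' :: rest) pre.length
            = bEnd (pre ++ '<' :: rest) rest (pre.length + 1) := by
          simp [bEnd]
        have hrw : pre ++ '<' :: rest = (pre ++ ['<']) ++ rest := by simp
        rw [hrec, hrw]
        have := ih (pre ++ ['<']) (t + 1) (by
          rw [hcnt, hcnt]; simp; omega)
        simp only [List.length_append, List.length_singleton] at this
        rw [this]
        simp [nextArgClassDepth]
      · by_cases hgt : c = '>'
        · subst hgt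
          have hrec : bEnd (pre ++ '>' :: rest) ('>' :: rest) pre.length
              = bEnd (pre ++ '>' :: rest) rest (pre.length + 1) := by
            simp [bEnd]
          have hrw : pre ++ '>' :: rest = (pre ++ ['>']) ++ rest := by simp
          rw [hrec, hrw]
          have := ih (pre ++ ['>']) (t - 1) (by
            rw [hcnt, hcnt]; simp; omega)
          simp only [List.length_append, List.length_singleton] at this
          rw [this]
          simp [nextArgClassDepth]
        · have hrec : bEnd (pre ++ c :: rest) (c :: rest) pre.length
              = bEnd (pre ++ c :: rest) rest (pre.length + 1) := by
            simp [bEnd, hsemi]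
          have hrw : pre ++ c :: rest = (pre ++ [c]) ++ rest := by simp
          rw [hrec, hrw]
          have := ih (pre ++ [c]) t (by
            rw [hcnt, hcnt]; simp [hlt, hgt]; omega)
          simp only [List.length_append, List.length_singleton] at this
          rw [this]
          simp [nextArgClassDepth, hsemi, hlt, hgt]

-- single-character str.find (with -1 mapped to len) is findIdx
theorem find_single_eq_findIdx (l : List Char) (c : Char) :
    (if PySem.Chars.find l [c] = -1 then (l.length : Nat) else (PySem.Chars.find l [c]).toNat)
      = l.findIdx (fun x => x = c) := by
  by_cases h : PySem.Chars.find l [c] = -1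
  · rw [if_pos h]
    rw [PySem.Chars.find_eq_neg_one_iff] at h
    have hc : c ∉ l := by
      intro hm
      obtain ⟨l1, l2, rfl⟩ := List.append_of_mem hm
      exact h ⟨l1, l2, by simp⟩
    symm
    rw [List.findIdx_eq_length]
    intro x hx
    simp only [decide_eq_false_iff_not]
    intro hxc; exact hc (hxc ▸ hx)
  · rw [if_neg h]
    have hnn : 0 ≤ PySem.Chars.find l [c] := by
      have := PySem.Chars.neg_one_le_find (s := l) (sub := [c])
      omega
    obtain ⟨hpre, hmin⟩ := PySem.Chars.find_spec (s := l) (sub := [c]) hnn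
    have hlen : PySem.Chars.find l [c] ≤ l.length := PySem.Chars.find_le_length l [c]
    set k := (PySem.Chars.find l [c]).toNat with hk
    have hklt : k < l.length := by
      rcases hpre with ⟨tl, htl⟩
      have h1 : (l.drop k).length = tl.length + 1 := by rw [← htl]; simp
      simp only [List.length_drop] at h1
      omega
    symm
    rw [List.findIdx_eq hklt]
    rcases hpre with ⟨tl, htl⟩
    rw [List.drop_eq_getElem_cons hklt] at htl
    simp only [List.cons_append, List.cons.injEq] at htl
    constructor
    · exact decide_eq_true htl.1.symm
    · intro j hj
      have hno := hmin j hj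
      rw [decide_eq_false_iff_not]
      intro hjc'
      apply hno
      refine ⟨l.drop (j + 1), ?_⟩
      have hjlt : j < l.length := by omega
      rw [List.drop_eq_getElem_cons hjlt]
      simp [hjc']

-- findIdx of a disjunction is the min of the two findIdx's
theorem findIdx_or_eq_min (l : List Char) :
    l.findIdx (fun c => c = ';' || c = '<')
      = min (l.findIdx (fun x => x = '<')) (l.findIdx (fun x => x = ';')) := by
  induction l with
  | nil => simp
  | cons c rest ih =>
    by_cases h1 : c = ';'
    · simp [List.findIdx_cons, h1]
    · by_cases h2 : c = '<'
      · simp [List.findIdx_cons, h2]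
      · simp only [List.findIdx_cons, h1, h2, decide_false, Bool.false_or, cond_false, ih]
        omega

-- ===== VERDICT (by name: the statement is the Claim_ definition above) =====
theorem next_arg_class_py_spec : Claim_equal_next_arg_class_py := by
  intro s _
  unfold Spec_next_arg_class_py next_arg_class_py next_arg_class_py_alt
  dsimp only
  have hle : s.toList.findIdx (fun c => c = ';' || c = '<') ≤ s.toList.length :=
    List.findIdx_le_length
  rw [nextArgClassGo_eq s.toList 0 s.toList.length s.toList.length 0 (by omega)]
  have hb : bEnd s.toList s.toList 0 = nextArgClassDepth s.toList 0 0 := by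
    have := bEnd_eq_depth s.toList [] 0 (by simp)
    simpa using this
  rw [hb]
  simp only [Prod.mk.injEq]
  constructor
  · rw [find_single_eq_findIdx, find_single_eq_findIdx, ← findIdx_or_eq_min]
    have hmin : min s.toList.length
          (0 + s.toList.findIdx (fun c => c = ';' || c = '<'))
        = s.toList.findIdx (fun c => c = ';' || c = '<') := by omega
    rw [hmin]
  · trivial
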